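-- pv_equiv track=rewrite | github.com/ericwang619/fa20bros | main.py | rr_rotate
-- ===== SOURCE A (Python) =====
-- from collections import deque
--
-- def rr_rotate(brothers, num_week):
--     for i in range(num_week):  # rotate based on which week it is
--
--         mid = int(len(brothers) / 2)  # split into two halves
--         bros1 = brothers[:mid]
--         bros2 = brothers[mid:]
--
--         first_bro_1 = bros1[0]  # store edge bros
--         last_bro_2 = bros2[-1]
--
--         bros1 = deque(bros1)  # deque for rotation
--         bros2 = deque(bros2)
--
--         bros1.rotate(-1)
--         bros2.rotate(1)
--
--         bros1 = list(bros1)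
--         bros2 = list(bros2)
--
--         bros1[-1] = last_bro_2  # update edge bros
--         bros2[0] = bros1[0]
--         bros1[0] = first_bro_1
--
--         brothers = bros1 + bros2  # combine halves
--
--     return brothers
-- ===== SOURCE B (Python) =====
-- def rr_rotate(brothers, num_week):
--     # One-shot O(n): the weekly step fixes seat 0 and cycles the other seats
--     # around the round-robin circle; apply num_week steps as one rotation.
--     if num_week <= 0:
--         return brothers
--     n = len(brothers)
--     mid = n // 2
--     v = brothers[mid:] + brothers[1:mid][::-1]   # circle values, clockwise
--     k = num_week % (n - 1)
--     w = v[-k:] + v[:-k] if k else v              # rotate the circle k seats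
--     return [brothers[0]] + w[n - mid:][::-1] + w[:n - mid]
-- ===== Notes on version B (the rewrite author's own statement) =====
-- stated objective: faster
-- what changed: Instead of simulating the two-half deque rotation week by week, B observes that each week fixes seat 0 and advances every other brother one seat along the round-robin circle, so it applies all num_week steps at once as a single rotation of the circle list by num_week mod (n-1).
import Mathlib
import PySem

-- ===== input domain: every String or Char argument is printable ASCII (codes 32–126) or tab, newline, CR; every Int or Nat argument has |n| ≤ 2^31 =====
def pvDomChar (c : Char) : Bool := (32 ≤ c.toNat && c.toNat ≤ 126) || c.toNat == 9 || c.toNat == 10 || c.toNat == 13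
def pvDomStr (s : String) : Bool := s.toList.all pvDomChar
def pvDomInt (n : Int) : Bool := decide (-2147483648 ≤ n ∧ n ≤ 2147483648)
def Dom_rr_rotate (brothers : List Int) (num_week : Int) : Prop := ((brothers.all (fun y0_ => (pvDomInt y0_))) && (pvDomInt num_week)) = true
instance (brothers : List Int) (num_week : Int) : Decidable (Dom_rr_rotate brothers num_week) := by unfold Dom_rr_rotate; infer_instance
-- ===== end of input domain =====

-- B replaces A's week-by-week two-deque simulation by one O(n) rotation of the
-- round-robin circle (seat 0 is fixed; all other seats advance one place per week).

-- ===== PORT A =====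
-- one loop body of A: split in halves, rotate the deques, patch the three edge seats.
-- `int(len(brothers) / 2)` is ported as Nat division (exact: lengths are nonnegative and
-- far below 2^52, where float division is exact on halves).
-- deque.rotate(-1) / rotate(1) are hand-ported as drop/take splits (exact, incl. length ≤ 1).
-- `none` = the IndexError A raises (bros1[0] / bros2[-1] on a list of length < 2);
-- the in-place index assignments use the total forms pySetD/pyGetD, reached only when
-- both halves are nonempty, where they are exact.
def rrStepA (xs : List Int) : Option (List Int) :=
  let mid : Nat := xs.length / 2
  let bros1 := PySem.List.slice xs none (some (mid : Int))
  let bros2 := PySem.List.slice xs (some (mid : Int)) none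
  (PySem.List.pyGet? bros1 0).bind fun first_bro_1 =>
  (PySem.List.pyGet? bros2 (-1)).map fun last_bro_2 =>
    let b1 := bros1.drop 1 ++ bros1.take 1                                    -- bros1.rotate(-1)
    let b2 := bros2.drop (bros2.length - 1) ++ bros2.take (bros2.length - 1)  -- bros2.rotate(1)
    let b1 := PySem.List.pySetD b1 (-1) last_bro_2                            -- bros1[-1] = last_bro_2
    let b2 := PySem.List.pySetD b2 0 (PySem.List.pyGetD b1 0 0)               -- bros2[0] = bros1[0]
    let b1 := PySem.List.pySetD b1 0 first_bro_1                              -- bros1[0] = first_bro_1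
    b1 ++ b2

def rr_rotate (brothers : List Int) (num_week : Int) : List Int :=
  ((PySem.List.pyRange 0 num_week 1).foldl
      (fun st _ => st.bind rrStepA) (some brothers)).getD brothers

-- ===== PORT B =====
-- `brothers[0]` is read via the total form pyGetD (reached only with num_week ≥ 1, where
-- Pre_ gives a nonempty list); same for `% (n-1)` (Pre_ gives n ≥ 2).
def rr_rotate_alt (brothers : List Int) (num_week : Int) : List Int :=
  if num_week ≤ 0 then brothers
  else
    let n : Int := PySem.List.len brothers
    let mid : Int := PySem.Int.floordiv n 2
    let v := PySem.List.slice brothers (some mid) none ++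
             (PySem.List.slice brothers (some 1) (some mid)).reverse          -- brothers[mid:] + brothers[1:mid][::-1]
    let k : Int := PySem.Int.mod num_week (n - 1)
    let w := if k ≠ 0 then
               PySem.List.slice v (some (-k)) none ++ PySem.List.slice v none (some (-k))
             else v                                                           -- v[-k:] + v[:-k] if k else v
    PySem.List.pyGetD brothers 0 0 ::
      ((PySem.List.slice w (some (n - mid)) none).reverse ++
        PySem.List.slice w none (some (n - mid)))                             -- [brothers[0]] + w[n-mid:][::-1] + w[:n-mid]

-- ===== PRECONDITION & SPEC =====
-- A raises IndexError (bros1[0] or bros2[-1] on an empty half) exactly when the loop body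
-- runs (num_week ≥ 1) on a list of length < 2; B raises there too (ZeroDivisionError /
-- IndexError).  Nothing else is excluded.
def Pre_rr_rotate (brothers : List Int) (num_week : Int) : Prop :=
  num_week ≤ 0 ∨ 2 ≤ brothers.length
instance (brothers : List Int) (num_week : Int) : Decidable (Pre_rr_rotate brothers num_week) := by unfold Pre_rr_rotate; infer_instance

def pvWitness_rr_rotate : List Int × Int := ([1, 2, 3, 4, 5], 3)

def Spec_rr_rotate (brothers : List Int) (num_week : Int) (out : List Int) : Prop := out = rr_rotate_alt brothers num_week
instance (brothers : List Int) (num_week : Int) (out : List Int) : Decidable (Spec_rr_rotate brothers num_week out) := by unfold Spec_rr_rotate; infer_instance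

-- ===== CLAIM (what is proved, stated in full; the proofs are below) =====
def Claim_equal_rr_rotate : Prop := ∀ (brothers : List Int) (num_week : Int), Dom_rr_rotate brothers num_week → Pre_rr_rotate brothers num_week → Spec_rr_rotate brothers num_week (rr_rotate brothers num_week)

-- ===== LEMMAS AND PROOFS =====

-- the one-week rotation of the circle list (last element moves to the front)
def rot1 (w : List Int) : List Int := w.drop (w.length - 1) ++ w.take (w.length - 1)

-- qOf L = n - n/2 is the size of the second half (n = L + 1 brothers, circle of L seats)
def qOf (L : Nat) : Nat := (L + 1) - (L + 1) / 2

-- the circle w reassembled into the seating list with fixed head b0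
def asm (b0 : Int) (w : List Int) : List Int :=
  b0 :: ((w.drop (qOf w.length)).reverse ++ w.take (qOf w.length))

theorem rot1_length (w : List Int) : (rot1 w).length = w.length := by
  simp [rot1]

theorem rot1_rotR_step (w : List Int) (d : Nat) (h1 : 1 ≤ d) (h2 : d ≤ w.length) :
    rot1 (w.drop d ++ w.take d) = w.drop (d - 1) ++ w.take (d - 1) := by
  unfold rot1
  rw [List.drop_append, List.take_append]
  simp only [List.length_append, List.length_drop, List.length_take]
  have hd : d ⊓ w.length = d := by omega
  rw [hd]
  have e1 : w.length - d + d - 1 - (w.length - d) = d - 1 := by omega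
  have e2 : (w.drop d).drop (w.length - d + d - 1) = [] := by
    apply List.drop_eq_nil_of_le; simp; omega
  have e3 : (w.drop d).take (w.length - d + d - 1) = w.drop d := by
    apply List.take_of_length_le; simp; omega
  rw [e1, e2, e3]
  have e4 : (w.take d).drop (d-1) = (w.drop (d-1)).take (d - (d-1)) := by
    rw [List.drop_take]
  have e5 : (w.take d).take (d-1) = w.take (d-1) := by
    rw [List.take_take]; congr 1; omega
  rw [e4, e5]
  have e6 : d - (d-1) = 1 := by omega
  rw [e6]
  have e7 : w.drop (d-1) = (w.drop (d-1)).take 1 ++ (w.drop (d-1)).drop 1 := (List.take_append_drop _ _).symm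
  conv_rhs => rw [e7]
  rw [List.drop_drop]
  have e8 : d - 1 + 1 = d := by omega
  rw [e8]
  simp

theorem rot1_iterate (w : List Int) (hw : 1 ≤ w.length) (m : Nat) :
    rot1^[m] w = w.drop (w.length - m % w.length) ++ w.take (w.length - m % w.length) := by
  induction m with
  | zero => simp
  | succ m ih =>
      rw [Function.iterate_succ_apply', ih]
      have hs : m % w.length < w.length := Nat.mod_lt _ (by omega)
      rw [rot1_rotR_step w (w.length - m % w.length) (by omega) (by omega)]
      have hmod : (m+1) % w.length = (m % w.length + 1 % w.length) % w.length := Nat.add_mod m 1 _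
      by_cases hL : m % w.length + 1 = w.length
      · have : (m+1) % w.length = 0 := by
          rcases Nat.eq_or_lt_of_le hw with h1 | h1
          · rw [hmod, ← h1]; omega
          · rw [hmod, Nat.mod_eq_of_lt h1, hL, Nat.mod_self]
        rw [this]
        have : w.length - m % w.length - 1 = 0 := by omega
        rw [this]
        simp
      · have h1 : 1 < w.length := by
          rcases Nat.eq_or_lt_of_le hw with h1 | h1
          · exfalso; apply hL; omega
          · exact h1
        have : (m+1) % w.length = m % w.length + 1 := by
          rw [hmod, Nat.mod_eq_of_lt h1, Nat.mod_eq_of_lt (by omega)]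
        rw [this]
        congr 1

theorem stepA_main (b0 z t : Int) (w1 w2 : List Int)
    (hmid : (w1.length + w2.length + 3) / 2 = w2.length + 2) :
    rrStepA (b0 :: t :: (w2.reverse ++ (w1 ++ [z]))) =
      some (b0 :: (w2.reverse ++ [z] ++ (t :: w1))) := by
  unfold rrStepA
  dsimp only
  have hlen : (b0 :: t :: (w2.reverse ++ (w1 ++ [z]))).length = w1.length + w2.length + 3 := by
    simp; omega
  rw [PySem.List.slice_to_natCast, PySem.List.slice_from_natCast, hlen, hmid]
  have htake : (b0 :: t :: (w2.reverse ++ (w1 ++ [z]))).take (w2.length + 2) = b0 :: t :: w2.reverse := by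
    rw [show w2.length + 2 = (w2.reverse).length + 1 + 1 by simp]
    simp
  have hdrop : (b0 :: t :: (w2.reverse ++ (w1 ++ [z]))).drop (w2.length + 2) = w1 ++ [z] := by
    rw [show w2.length + 2 = (w2.reverse).length + 1 + 1 by simp]
    simp
  rw [htake, hdrop]
  rw [PySem.List.pyGet?_zero_cons, PySem.List.pyGet?_neg_one_append_singleton]
  simp only [Option.bind_some, Option.map_some]
  congr 1
  have h2 : (w1 ++ [z]).length - 1 = w1.length := by simp
  rw [h2, List.drop_left' (by rfl : w1.length = w1.length),
      List.take_left' (by rfl : w1.length = w1.length)]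
  -- b1 after rotate: (t :: w2.reverse) ++ [b0]
  have hb1 : (b0 :: t :: w2.reverse).drop 1 ++ (b0 :: t :: w2.reverse).take 1
      = (t :: w2.reverse) ++ [b0] := by simp
  rw [hb1]
  have hset1 : PySem.List.pySetD ((t :: w2.reverse) ++ [b0]) (-1) z = (t :: w2.reverse) ++ [z] := by
    simp [PySem.List.pySetD, PySem.List.pySet?, PySem.List.pyIdx?]
  rw [hset1]
  have hget : PySem.List.pyGetD ((t :: w2.reverse) ++ [z]) 0 0 = t := by
    rw [List.cons_append, PySem.List.pyGetD_zero_cons]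
  rw [hget]
  have hset2 : PySem.List.pySetD ([z] ++ w1) 0 t = t :: w1 := by
    simp [PySem.List.pySetD, PySem.List.pySet?, PySem.List.pyIdx?]
  rw [hset2]
  have hset3 : PySem.List.pySetD ((t :: w2.reverse) ++ [z]) 0 b0 = b0 :: (w2.reverse ++ [z]) := by
    simp [PySem.List.pySetD, PySem.List.pySet?, PySem.List.pyIdx?]
    rw [if_pos (by omega : (0:Int) ≤ (w2.length:Int) + 1)]
    rfl
  rw [hset3]
  simp


theorem stepA_two (b0 z : Int) : rrStepA [b0, z] = some [b0, z] := by
  simp [rrStepA, PySem.List.slice, PySem.List.pyGet?, PySem.List.pyIdx?,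
        PySem.List.pySetD, PySem.List.pySet?, PySem.List.clampIdx]

theorem stepA_three (b0 z1 z2 : Int) : rrStepA [b0, z1, z2] = some [b0, z2, z1] := by
  simp [rrStepA, PySem.List.slice, PySem.List.pyGet?, PySem.List.pyIdx?,
        PySem.List.pySetD, PySem.List.pySet?, PySem.List.clampIdx]

theorem stepA_asm (b0 : Int) (w : List Int) (hw : 1 ≤ w.length) :
    rrStepA (asm b0 w) = some (asm b0 (rot1 w)) := by
  have hqdef : qOf w.length = (w.length + 1) - (w.length + 1) / 2 := rfl
  by_cases h3 : 3 ≤ w.length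
  · have hq1 : 1 ≤ qOf w.length := by omega
    have hqL : qOf w.length + 1 ≤ w.length := by omega
    have httake : (w.take (qOf w.length)).length = qOf w.length := by simp; omega
    have htdrop : (w.drop (qOf w.length)).length = w.length - qOf w.length := by simp
    obtain ⟨w1, z, hwz⟩ : ∃ w1 z, w.take (qOf w.length) = w1 ++ [z] := by
      rcases List.eq_nil_or_concat (w.take (qOf w.length)) with h | ⟨w1, z, h⟩
      · exfalso; rw [h] at httake; simp at httake; omega
      · exact ⟨w1, z, by rw [h, List.concat_eq_append]⟩
    obtain ⟨w2, t, hwt⟩ : ∃ w2 t, w.drop (qOf w.length) = w2 ++ [t] := by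
      rcases List.eq_nil_or_concat (w.drop (qOf w.length)) with h | ⟨w2, t, h⟩
      · exfalso; rw [h] at htdrop; simp at htdrop; omega
      · exact ⟨w2, t, by rw [h, List.concat_eq_append]⟩
    have hw1 : w1.length = qOf w.length - 1 := by
      have := httake; rw [hwz] at this; simp at this; omega
    have hw2 : w2.length = w.length - qOf w.length - 1 := by
      have := htdrop; rw [hwt] at this; simp at this; omega
    have hw' : w = (w1 ++ [z] ++ w2) ++ [t] := by
      conv_lhs => rw [← List.take_append_drop (qOf w.length) w, hwz, hwt]
      simp
    have hasm : asm b0 w = b0 :: t :: (w2.reverse ++ (w1 ++ [z])) := by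
      unfold asm
      rw [hwz, hwt]
      simp
    have hrot : rot1 w = (t :: w1) ++ (z :: w2) := by
      unfold rot1
      conv_lhs => rw [hw']
      have hmlen : (w1 ++ [z] ++ w2).length = w.length - 1 := by simp; omega
      rw [show ((w1 ++ [z] ++ w2) ++ [t]).length - 1 = (w1 ++ [z] ++ w2).length by simp]
      rw [List.drop_left, List.take_left]
      simp
    have hasm2 : asm b0 (rot1 w) = b0 :: (w2.reverse ++ [z] ++ (t :: w1)) := by
      rw [hrot]
      unfold asm
      have hlen3 : ((t :: w1) ++ (z :: w2)).length = w.length := by simp; omega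
      rw [hlen3]
      have hq' : (t :: w1).length = qOf w.length := by simp; omega
      rw [List.take_left' hq', List.drop_left' hq']
      simp
    rw [hasm, hasm2]
    exact stepA_main b0 z t w1 w2 (by omega)
  · -- w.length = 1 or 2: concrete shapes
    rcases w with _ | ⟨a, _ | ⟨b, _ | ⟨c, rest⟩⟩⟩
    · simp at hw
    · show rrStepA (asm b0 [a]) = some (asm b0 (rot1 [a]))
      have : asm b0 [a] = [b0, a] := by simp [asm, qOf]
      rw [this, stepA_two]
      simp [asm, qOf, rot1]
    · have : asm b0 [a, b] = [b0, a, b] := by simp [asm, qOf]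
      rw [this, stepA_three]
      simp [asm, qOf, rot1]
    · exfalso; simp at h3

-- A's fold only uses the length of the range list
theorem foldl_bind_length (f : List Int → Option (List Int)) (l : List Int) (st0 : Option (List Int)) :
    l.foldl (fun st _ => st.bind f) st0 = (fun s => s.bind f)^[l.length] st0 := by
  induction l generalizing st0 with
  | nil => rfl
  | cons x xs ih => simp [List.foldl_cons, ih, Function.iterate_succ_apply]

theorem rot1_iterate_length (w : List Int) (k : Nat) : (rot1^[k] w).length = w.length := by
  induction k with
  | zero => rfl
  | succ k ih => rw [Function.iterate_succ_apply', rot1_length, ih]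

theorem loop_asm (b0 : Int) (w : List Int) (hw : 1 ≤ w.length) (m : Nat) :
    (fun s => s.bind rrStepA)^[m] (some (asm b0 w)) = some (asm b0 (rot1^[m] w)) := by
  induction m with
  | zero => rfl
  | succ m ih =>
      rw [Function.iterate_succ_apply', ih]
      have h' : 1 ≤ (rot1^[m] w).length := by rw [rot1_iterate_length]; exact hw
      show (some (asm b0 (rot1^[m] w))).bind rrStepA = _
      rw [Option.bind_some, stepA_asm _ _ h', Function.iterate_succ_apply']

-- ===== VERDICT (by name: the statement is the Claim_ definition above) =====
theorem rr_rotate_spec : Claim_equal_rr_rotate := by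
  unfold Claim_equal_rr_rotate Spec_rr_rotate Pre_rr_rotate
  intro brothers num_week _ hpre
  by_cases hz : num_week ≤ 0
  · unfold rr_rotate rr_rotate_alt
    rw [if_pos hz]
    have hr : PySem.List.pyRange 0 num_week 1 = [] := by
      simp [PySem.List.pyRange]
      omega
    rw [hr]
    rfl
  · rw [not_le] at hz
    have hlen2 : 2 ≤ brothers.length := by
      rcases hpre with h | h
      · omega
      · exact h
    obtain ⟨b0, r, rfl⟩ : ∃ b0 r, brothers = b0 :: r := by
      cases brothers with
      | nil => simp at hlen2
      | cons b0 r => exact ⟨b0, r, rfl⟩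
    have hrlen : 1 ≤ r.length := by simp at hlen2; omega
    -- abbreviations
    set n : Nat := (b0 :: r).length with hn
    have hnr : n = r.length + 1 := by simp [hn]
    have hL1 : 1 ≤ n - 1 := by omega
    set N : Nat := num_week.toNat with hN
    have hnw : num_week = (N : Int) := by omega
    have hmid1 : 1 ≤ n / 2 := by omega
    -- the circle list
    set v : List Int := r.drop (n / 2 - 1) ++ (r.take (n / 2 - 1)).reverse with hv
    have hvlen : v.length = n - 1 := by simp [hv]; omega
    -- the base seating is asm b0 v
    have hbase : asm b0 v = b0 :: r := by
      unfold asm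
      rw [hvlen]
      have hq : qOf (n - 1) = n - n / 2 := by unfold qOf; omega
      have h1 : v.take (qOf (n - 1)) = r.drop (n / 2 - 1) := by
        rw [hq]
        apply List.take_left'
        simp
        omega
      have h2 : v.drop (qOf (n - 1)) = (r.take (n / 2 - 1)).reverse := by
        rw [hq]
        apply List.drop_left'
        simp
        omega
      rw [h1, h2, List.reverse_reverse, List.take_append_drop]
    -- A's result
    have hA : rr_rotate (b0 :: r) num_week = asm b0 (rot1^[N] v) := by
      unfold rr_rotate
      rw [foldl_bind_length, hnw, PySem.List.pyRange_zero_natCast, List.length_map,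
          List.length_range, ← hbase, loop_asm _ _ (by omega), Option.getD_some]
    -- B's result
    have hB : rr_rotate_alt (b0 :: r) num_week = asm b0 (rot1^[N] v) := by
      unfold rr_rotate_alt
      rw [if_neg (by omega)]
      dsimp only
      have hlen' : PySem.List.len (b0 :: r) = (n : Int) := by
        rw [PySem.List.len_eq]
      rw [hlen']
      have hmid' : PySem.Int.floordiv (n : Int) 2 = ((n / 2 : Nat) : Int) := by
        rw [PySem.Int.floordiv_eq_ediv_of_pos (by omega)]
        exact (Nat.ToInt.div_congr rfl rfl).symm
      rw [hmid']
      have hs1 : PySem.List.slice (b0 :: r) (some ((n / 2 : Nat) : Int)) none = r.drop (n / 2 - 1) := by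
        rw [PySem.List.slice_from_natCast]
        rw [show (n / 2) = (n / 2 - 1) + 1 by omega]
        rfl
      have hs2 : PySem.List.slice (b0 :: r) (some 1) (some ((n / 2 : Nat) : Int)) = r.take (n / 2 - 1) := by
        rw [show (1 : Int) = ((1 : Nat) : Int) by norm_num, PySem.List.slice_natCast]
        simp
      rw [hs1, hs2, ← hv]
      have hq2 : ((n : Int) - ((n / 2 : Nat) : Int)) = (((n - n / 2 : Nat)) : Int) := by omega
      have hqOf : qOf (n - 1) = n - n / 2 := by unfold qOf; omega
      have hout : ∀ w : List Int, w.length = n - 1 →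
          PySem.List.pyGetD (b0 :: r) 0 0 ::
            ((PySem.List.slice w (some ((n : Int) - ((n / 2 : Nat) : Int))) none).reverse ++
              PySem.List.slice w none (some ((n : Int) - ((n / 2 : Nat) : Int)))) = asm b0 w := by
        intro w hwl
        rw [PySem.List.pyGetD_zero_cons, hq2, PySem.List.slice_from_natCast,
            PySem.List.slice_to_natCast]
        unfold asm
        rw [hwl, hqOf]
      have hk : PySem.Int.mod num_week ((n : Int) - 1) = ((N % (n - 1) : Nat) : Int) := by
        rw [show ((n : Int) - 1) = (((n - 1 : Nat)) : Int) by omega,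
            PySem.Int.mod_eq_emod_of_pos (by omega : (0:Int) < ((n - 1 : Nat) : Int)), hnw]
        exact (Int.natCast_emod N (n - 1)).symm
      rw [hk]
      by_cases hkn : N % (n - 1) = 0
      · rw [hkn, if_neg (by norm_num)]
        have hrot0 : rot1^[N] v = v := by
          rw [rot1_iterate v (by rw [hvlen]; omega) N, hvlen, hkn, Nat.sub_zero,
              List.drop_eq_nil_of_le (by omega), List.take_of_length_le (by omega)]
          simp
        rw [hrot0]
        exact hout v hvlen
      · rw [if_pos (by exact_mod_cast hkn)]
        have hw : PySem.List.slice v (some (-((N % (n - 1) : Nat) : Int))) none ++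
              PySem.List.slice v none (some (-((N % (n - 1) : Nat) : Int))) = rot1^[N] v := by
          rw [PySem.List.slice_from_neg_natCast v _ (by omega),
              PySem.List.slice_to_neg_natCast v _ (by omega),
              rot1_iterate v (by rw [hvlen]; omega) N, hvlen]
        rw [hw]
        exact hout _ (by rw [rot1_iterate_length, hvlen])
    rw [hA, hB]
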